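-- pv_equiv track=rewrite | github.com/Alexsandr250897/Work_test | verify_text.py | verify_text
-- ===== SOURCE A (Python) =====
-- def verify_text(test_text, list_keys):
--     if test_text.count('{') != test_text.count('}'):
--         return "Ошибка: несоответствие количества открывающих и закрывающих скобок"
--     start = 0
--     while True:
--         start = test_text.find('{', start)
--         if start == -1:
--             break
--         end = test_text.find('}', start)
--         if end == -1:
--             return "Ошибка: незакрытая фигурная скобка"
--         key = test_text[start + 1:end]
--         if key not in list_keys:
--             return f"Ошибка: некорректный ключ '{key}'"
--         start = end + 1
--     return "Все проверки пройдены"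
-- ===== SOURCE B (Python) =====
-- def verify_text(test_text, list_keys):
--     if test_text.count('{') != test_text.count('}'):
--         return "Ошибка: несоответствие количества открывающих и закрывающих скобок"
--     waiting = False
--     buf = []
--     for c in test_text:
--         if waiting:
--             if c == '}':
--                 key = ''.join(buf)
--                 if key not in list_keys:
--                     return f"Ошибка: некорректный ключ '{key}'"
--                 waiting = False
--             else:
--                 buf.append(c)
--         elif c == '{':
--             buf = []
--             waiting = True
--     if waiting:
--         return "Ошибка: незакрытая фигурная скобка"
--     return "Все проверки пройдены"
-- ===== Notes on version B (the rewrite author's own statement) =====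
-- stated objective: alternative
-- what changed: A's find('{')/find('}') jump loop with absolute indices and slicing is replaced by a single character-by-character state-machine scan (waiting flag + accumulating key buffer); the count guard is kept as the first pass.
import Mathlib
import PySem

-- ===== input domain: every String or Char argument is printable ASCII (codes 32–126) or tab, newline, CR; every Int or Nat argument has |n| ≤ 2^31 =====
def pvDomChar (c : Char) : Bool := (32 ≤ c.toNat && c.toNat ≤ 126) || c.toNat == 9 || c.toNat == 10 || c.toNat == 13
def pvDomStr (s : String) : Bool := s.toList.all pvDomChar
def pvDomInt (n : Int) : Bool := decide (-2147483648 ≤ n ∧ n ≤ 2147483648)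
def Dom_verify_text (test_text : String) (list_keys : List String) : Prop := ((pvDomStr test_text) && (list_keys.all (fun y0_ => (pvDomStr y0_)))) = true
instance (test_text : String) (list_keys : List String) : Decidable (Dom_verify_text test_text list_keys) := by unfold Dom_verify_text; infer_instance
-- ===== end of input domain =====

-- B replaces A's find-and-jump loop by a single character-by-character state-machine scan
-- (objective: alternative decomposition, same linear cost; return value proved equal).

-- ===== PORT A =====
-- A's `find('{', start)` / `find('}', start)` jumps are ported exactly as single-character
-- scans over the remaining suffix (dropWhile/takeWhile), carrying the suffix instead of the
-- absolute index `start`; exact because both patterns are one character long.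
def pvA_loop (list_keys : List String) (t : List Char) : String :=
  match h : t.dropWhile (fun c => c ≠ '{') with
  | [] => "Все проверки пройдены"                       -- find('{', start) == -1: break, final return
  | _ :: u =>                                            -- '{' found; u = text after it
    if '}' ∈ u then                                      -- end = find('}', start)
      let key := u.takeWhile (fun c => c ≠ '}')          -- key = test_text[start+1:end]
      if String.ofList key ∈ list_keys then
        pvA_loop list_keys ((u.dropWhile (fun c => c ≠ '}')).drop 1)   -- start = end + 1
      else "Ошибка: некорректный ключ '" ++ String.ofList key ++ "'"
    else "Ошибка: незакрытая фигурная скобка"            -- end == -1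
termination_by t.length
decreasing_by
  have h1 := List.length_dropWhile_le (fun c => c ≠ '{') t
  rw [h] at h1
  have h2 := List.length_dropWhile_le (fun c => c ≠ '}') u
  simp only [List.length_cons, List.length_drop] at *
  omega

def verify_text (test_text : String) (list_keys : List String) : String :=
  if PySem.Str.count test_text "{" ≠ PySem.Str.count test_text "}" then
    "Ошибка: несоответствие количества открывающих и закрывающих скобок"
  else pvA_loop list_keys test_text.toList

-- ===== PORT B =====
-- B's for-loop over the characters with state (waiting, buf); early returns become results.
def pvB_scan (list_keys : List String) : List Char → Bool → List Char → String
  | [], waiting, _ =>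
    if waiting then "Ошибка: незакрытая фигурная скобка" else "Все проверки пройдены"
  | c :: cs, waiting, buf =>
    if waiting then
      if c = '}' then
        if String.ofList buf ∈ list_keys then pvB_scan list_keys cs false buf
        else "Ошибка: некорректный ключ '" ++ String.ofList buf ++ "'"
      else pvB_scan list_keys cs true (buf ++ [c])
    else if c = '{' then pvB_scan list_keys cs true []
    else pvB_scan list_keys cs false buf

def verify_text_alt (test_text : String) (list_keys : List String) : String :=
  if PySem.Str.count test_text "{" ≠ PySem.Str.count test_text "}" then
    "Ошибка: несоответствие количества открывающих и закрывающих скобок"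
  else pvB_scan list_keys test_text.toList false []

-- ===== PRECONDITION & SPEC =====
def Spec_verify_text (test_text : String) (list_keys : List String) (out : String) : Prop := out = verify_text_alt test_text list_keys
instance (test_text : String) (list_keys : List String) (out : String) : Decidable (Spec_verify_text test_text list_keys out) := by unfold Spec_verify_text; infer_instance

-- ===== CLAIM (what is proved, stated in full; the proofs are below) =====
def Claim_equal_verify_text : Prop := ∀ (test_text : String) (list_keys : List String), Dom_verify_text test_text list_keys → Spec_verify_text test_text list_keys (verify_text test_text list_keys)

-- ===== LEMMAS AND PROOFS =====

-- While not waiting, the scan ignores every character except '{' (buf untouched).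
theorem pvB_scan_skip (list_keys : List String) (t : List Char) (buf : List Char) :
    pvB_scan list_keys t false buf = pvB_scan list_keys (t.dropWhile (fun c => c ≠ '{')) false buf := by
  induction t with
  | nil => rfl
  | cons c cs ih =>
    by_cases hc : c = '{'
    · simp [pvB_scan, hc, List.dropWhile]
    · simp [pvB_scan, hc, List.dropWhile, ih]

-- While waiting, if no '}' remains the scan ends still waiting.
theorem pvB_scan_unclosed (list_keys : List String) (u : List Char) :
    '}' ∉ u → ∀ buf, pvB_scan list_keys u true buf = "Ошибка: незакрытая фигурная скобка" := by
  induction u with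
  | nil => intro _ _; rfl
  | cons c cs ih =>
    intro h buf
    have hc : c ≠ '}' := fun hcc => h (hcc ▸ List.mem_cons_self ..)
    simp only [pvB_scan, if_neg hc]
    exact ih (fun hm => h (List.mem_cons_of_mem _ hm)) _

-- While waiting, the scan accumulates the key up to the first '}' and then validates it.
theorem pvB_scan_close (list_keys : List String) (k : List Char) (rest : List Char) :
    '}' ∉ k → ∀ buf, pvB_scan list_keys (k ++ '}' :: rest) true buf =
      (if String.ofList (buf ++ k) ∈ list_keys then pvB_scan list_keys rest false (buf ++ k)
       else "Ошибка: некорректный ключ '" ++ String.ofList (buf ++ k) ++ "'") := by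
  induction k with
  | nil => intro _ buf; simp [pvB_scan]
  | cons c cs ih =>
    intro h buf
    have hc : c ≠ '}' := fun hcc => h (hcc ▸ List.mem_cons_self ..)
    simp only [List.cons_append, pvB_scan, if_neg hc]
    rw [ih (fun hm => h (List.mem_cons_of_mem _ hm)) (buf ++ [c])]
    simp

-- Main loop equivalence: A's find-jump loop equals B's state machine from the idle state.
theorem pvAB_loop_eq_bounded (list_keys : List String) :
    ∀ (n : Nat) (t : List Char), t.length ≤ n → ∀ buf,
      pvB_scan list_keys t false buf = pvA_loop list_keys t := by
  intro n
  induction n with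
  | zero =>
    intro t ht buf
    have : t = [] := List.length_eq_zero_iff.mp (Nat.le_zero.mp ht)
    subst this
    rw [pvA_loop]
    rfl
  | succ n ih =>
    intro t ht buf
    rw [pvB_scan_skip, pvA_loop]
    split
    · rename_i h; rw [h]; rfl
    · rename_i c u h
      rw [h]
      -- the first character found by dropWhile fails the predicate, so it is '{'
      have hne : t.dropWhile (fun c => c ≠ '{') ≠ [] := by rw [h]; simp
      have hc : c = '{' := by
        have := List.head_dropWhile_not (fun c => c ≠ '{') hne
        simp only [h, List.head_cons] at this
        simpa using this
      subst hc
      have hulen : u.length < t.length := by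
        have h1 := List.length_dropWhile_le (fun c => c ≠ '{') t
        rw [h] at h1; simp at h1; omega
      have hstep : pvB_scan list_keys ('{' :: u) false buf = pvB_scan list_keys u true [] := by
        simp [pvB_scan]
      rw [hstep]
      split
      · rename_i hmem
        -- decompose u = takeWhile ++ '}' :: rest
        have hdw : u.dropWhile (fun c => c ≠ '}') ≠ [] := by
          rw [ne_eq, List.dropWhile_eq_nil_iff]
          intro hall
          have := hall '}' hmem
          simp at this
        obtain ⟨d, r, hdr⟩ := List.exists_cons_of_ne_nil hdw
        have hd : d = '}' := by
          have := List.head_dropWhile_not (fun c => c ≠ '}') hdw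
          simp only [hdr, List.head_cons] at this
          simpa using this
        subst hd
        have hu : u = u.takeWhile (fun c => c ≠ '}') ++ '}' :: r := by
          conv_lhs => rw [← List.takeWhile_append_dropWhile (p := fun c => c ≠ '}') (l := u)]
          rw [hdr]
        have hnotin : '}' ∉ u.takeWhile (fun c => c ≠ '}') := by
          intro hm
          have := List.mem_takeWhile_imp hm
          simp at this
        have hrlen : r.length ≤ n := by
          have : u.length = (u.takeWhile (fun c => c ≠ '}')).length + r.length + 1 := by
            conv_lhs => rw [hu]
            simp; omega
          omega
        conv_lhs => rw [hu]
        rw [pvB_scan_close _ _ _ hnotin []]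
        rw [hdr]
        simp only [List.nil_append, List.drop_one, List.tail_cons]
        split
        · exact ih r hrlen _
        · rfl
      · rename_i hmem
        exact pvB_scan_unclosed _ u hmem []

theorem pvAB_loop_eq (list_keys : List String) (t : List Char) (buf : List Char) :
    pvB_scan list_keys t false buf = pvA_loop list_keys t :=
  pvAB_loop_eq_bounded list_keys t.length t (Nat.le_refl _) buf

-- ===== VERDICT (by name: the statement is the Claim_ definition above) =====
theorem verify_text_spec : Claim_equal_verify_text := by
  intro t keys _
  unfold Spec_verify_text verify_text verify_text_alt
  split_ifs with h
  · rfl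
  · exact (pvAB_loop_eq keys t.toList []).symm
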